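-- pv_equiv track=rewrite | github.com/ProDanceGrammer/RAG-Pipeline | scripts/measure_batch_size_ultimate.py | generate_texts
-- ===== SOURCE A (Python) =====
-- def generate_texts(count: int) -> list:
--     """Generate test texts by repeating base samples."""
--     base_texts = [
--         "What is encapsulation in object-oriented programming?",
--         "How does inheritance work in Python?",
--         "What are the SOLID principles?",
--         "Explain polymorphism with examples",
--         "What is the difference between composition and inheritance?",
--         "How do you implement a singleton pattern?",
--         "What is dependency injection?",
--         "Explain the factory pattern",
--         "What is the observer pattern?",
--         "How does the strategy pattern work?",
--     ]
--
--     # Repeat base texts to reach desired count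
--     texts = []
--     while len(texts) < count:
--         texts.extend(base_texts)
--
--     return texts[:count]
-- ===== SOURCE B (Python) =====
-- def generate_texts(count: int) -> list:
--     """Generate test texts by repeating base samples."""
--     base_texts = [
--         "What is encapsulation in object-oriented programming?",
--         "How does inheritance work in Python?",
--         "What are the SOLID principles?",
--         "Explain polymorphism with examples",
--         "What is the difference between composition and inheritance?",
--         "How do you implement a singleton pattern?",
--         "What is dependency injection?",
--         "Explain the factory pattern",
--         "What is the observer pattern?",
--         "How does the strategy pattern work?",
--     ]
--     return [base_texts[i % 10] for i in range(count)]
-- ===== Notes on version B (the rewrite author's own statement) =====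
-- stated objective: simpler
-- what changed: Replaces the grow-and-check while loop that materialises whole copies of the base list and then slices with a direct per-index construction: element i is base_texts[i % 10], built in one comprehension over range(count) with no over-allocation and no slice.
import Mathlib
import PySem

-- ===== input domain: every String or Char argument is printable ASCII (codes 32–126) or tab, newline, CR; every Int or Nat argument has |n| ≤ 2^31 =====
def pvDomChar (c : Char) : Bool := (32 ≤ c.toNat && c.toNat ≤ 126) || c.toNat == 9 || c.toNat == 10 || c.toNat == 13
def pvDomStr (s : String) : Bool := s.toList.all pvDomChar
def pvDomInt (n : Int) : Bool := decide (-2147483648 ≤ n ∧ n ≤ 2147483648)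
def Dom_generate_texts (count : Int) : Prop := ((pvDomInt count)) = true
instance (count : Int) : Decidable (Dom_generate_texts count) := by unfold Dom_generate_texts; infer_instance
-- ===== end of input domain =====

-- B replaces the grow-and-slice while loop with a direct per-index construction
-- (element i is base_texts[i % 10]) — simpler, no over-allocation and no slice.

-- the fixed base sample list (same data in A and B)
def pvBaseTexts : List String := [
  "What is encapsulation in object-oriented programming?",
  "How does inheritance work in Python?",
  "What are the SOLID principles?",
  "Explain polymorphism with examples",
  "What is the difference between composition and inheritance?",
  "How do you implement a singleton pattern?",
  "What is dependency injection?",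
  "Explain the factory pattern",
  "What is the observer pattern?",
  "How does the strategy pattern work?"]

-- ===== PORT A =====
-- the 'while len(texts) < count: texts.extend(base_texts)' loop
def pvLoopA (count : Int) (texts : List String) : List String :=
  if (texts.length : Int) < count then pvLoopA count (texts ++ pvBaseTexts) else texts
termination_by (count - texts.length).toNat
decreasing_by simp [pvBaseTexts]; omega

def generate_texts (count : Int) : List String :=
  PySem.List.slice (pvLoopA count []) none (some count)

-- ===== PORT B =====
-- '[base_texts[i % 10] for i in range(count)]'; the index i % 10 is always in
-- range 0..9, so pyGetD with a dummy default is exact for Python's base_texts[i % 10]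
def generate_texts_alt (count : Int) : List String :=
  (PySem.List.pyRange 0 count 1).map
    (fun i => PySem.List.pyGetD pvBaseTexts (PySem.Int.mod i 10) "")

-- ===== PRECONDITION & SPEC =====
def Spec_generate_texts (count : Int) (out : List String) : Prop := out = generate_texts_alt count
instance (count : Int) (out : List String) : Decidable (Spec_generate_texts count out) := by unfold Spec_generate_texts; infer_instance

-- ===== CLAIM (what is proved, stated in full; the proofs are below) =====
def Claim_equal_generate_texts : Prop := ∀ (count : Int), Dom_generate_texts count → Spec_generate_texts count (generate_texts count)

-- ===== LEMMAS AND PROOFS =====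

theorem pvLen_flatten_replicate (k : Nat) :
    ((List.replicate k pvBaseTexts).flatten).length = 10 * k := by
  simp [pvBaseTexts, Nat.mul_comm]

-- the loop's result: some number of copies of the base list appended to its start
-- state, and long enough
theorem pvLoopA_spec (count : Int) (ts : List String) :
    ∃ k, pvLoopA count ts = ts ++ (List.replicate k pvBaseTexts).flatten ∧
      count ≤ ((pvLoopA count ts).length : Int) := by
  fun_induction pvLoopA count ts with
  | case1 ts h ih =>
    obtain ⟨k, hk, hlen⟩ := ih
    exact ⟨k + 1, by simp [hk, List.replicate_succ], hlen⟩
  | case2 ts h => exact ⟨0, by simp, by omega⟩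

-- element j of enough copies of the base list is base[j % 10]
theorem pvGetElem_flatten_replicate (k j : Nat) (hj : j < 10 * k)
    (h1 : j < ((List.replicate k pvBaseTexts).flatten).length)
    (h2 : j % 10 < pvBaseTexts.length) :
    ((List.replicate k pvBaseTexts).flatten)[j] = pvBaseTexts[j % 10] := by
  induction k generalizing j with
  | zero => omega
  | succ k ih =>
    simp only [List.replicate_succ, List.flatten_cons]
    by_cases h : j < 10
    · rw [List.getElem_append_left (by simp [pvBaseTexts]; omega)]
      congr 1
      omega
    · rw [List.getElem_append_right (by simp [pvBaseTexts]; omega)]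
      have hmod : (j - pvBaseTexts.length) % 10 = j % 10 := by
        simp [pvBaseTexts]; omega
      rw [ih (j - pvBaseTexts.length) (by simp [pvBaseTexts]; omega)
        (by rw [pvLen_flatten_replicate]; simp [pvBaseTexts]; omega)
        (by omega)]
      congr 1

-- ===== VERDICT (by name: the statement is the Claim_ definition above) =====
theorem generate_texts_spec : Claim_equal_generate_texts := by
  intro count _
  unfold Spec_generate_texts generate_texts generate_texts_alt
  by_cases hc : count < 0
  · have hA0 : pvLoopA count [] = [] := by rw [pvLoopA]; simp; omega
    rw [hA0, PySem.List.pyRange_one_eq_nil (by omega)]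
    simp [PySem.List.slice]
  · push Not at hc
    obtain ⟨kA, hA, hlenA⟩ := pvLoopA_spec count []
    simp only [List.nil_append] at hA
    rw [hA] at hlenA ⊢
    rw [pvLen_flatten_replicate] at hlenA
    rw [PySem.List.slice_to _ hc]
    apply List.ext_getElem
    · simp [PySem.List.length_pyRange_one, pvBaseTexts]
      omega
    · intro j hj1 hj2
      have hjc : (j : Int) < count := by
        have := PySem.List.length_pyRange_one (a := 0) (b := count) 
        simp [this] at hj2
        omega
      have hjk : j < 10 * kA := by omega
      rw [List.getElem_take, List.getElem_map, PySem.List.getElem_pyRange_one]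
      have hmodc : PySem.Int.mod (0 + (j : Int)) 10 = ((j % 10 : Nat) : Int) := by
        rw [zero_add]
        exact_mod_cast PySem.Int.mod_natCast j 10
      rw [hmodc, PySem.List.pyGetD_natCast]
      rw [pvGetElem_flatten_replicate kA j hjk (by rw [pvLen_flatten_replicate]; omega) (by simp [pvBaseTexts]; omega)]
      rw [List.getD_eq_getElem _ _ (by simp [pvBaseTexts]; omega)]
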